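-- pv_equiv track=rewrite | github.com/Rafilde/sentiment-bfs | back-end_project/text_analysis.py | sentiment_analysis_feedback
-- ===== SOURCE A (Python) =====
-- def sentiment_analysis_feedback(updated_data_json):
--     sentiment_count = {'Positivo': 0, 'Neutro': 0, 'Negativo': 0}
--
--     for data in updated_data_json:
--         analyzed = data.get('analyzed')
--         if analyzed in sentiment_count:
--             sentiment_count[analyzed] += 1
--
--     max_count = max(sentiment_count.values())
--     most_common_sentiments = [sentiment for sentiment, count in sentiment_count.items() if count == max_count]
--     return most_common_sentiments
-- ===== SOURCE B (Python) =====
-- def sentiment_analysis_feedback(updated_data_json):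
--     labels = ('Positivo', 'Neutro', 'Negativo')
--     counts = {s: sum(1 for d in updated_data_json if d.get('analyzed') == s) for s in labels}
--     max_count = max(counts.values())
--     return [s for s in labels if counts[s] == max_count]
-- ===== Notes on version B (the rewrite author's own statement) =====
-- stated objective: alternative
-- what changed: Replaces the single incremental dict-updating pass with three independent per-label filtered count scans, then selects the labels whose count equals the maximum.
import Mathlib
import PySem

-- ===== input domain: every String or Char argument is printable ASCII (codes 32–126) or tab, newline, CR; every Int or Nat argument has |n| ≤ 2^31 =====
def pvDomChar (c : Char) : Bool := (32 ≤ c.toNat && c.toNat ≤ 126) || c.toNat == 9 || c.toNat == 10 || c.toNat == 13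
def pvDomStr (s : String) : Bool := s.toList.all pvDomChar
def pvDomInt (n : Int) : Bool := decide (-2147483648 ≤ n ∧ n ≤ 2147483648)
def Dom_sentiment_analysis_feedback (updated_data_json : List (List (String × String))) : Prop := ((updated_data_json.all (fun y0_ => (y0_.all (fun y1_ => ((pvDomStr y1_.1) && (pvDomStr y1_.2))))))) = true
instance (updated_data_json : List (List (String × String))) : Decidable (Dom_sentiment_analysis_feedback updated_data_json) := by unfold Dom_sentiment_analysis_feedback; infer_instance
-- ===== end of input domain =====

-- B replaces A's single incremental dict-updating pass by three independent per-label
-- count scans followed by a max-selection over the fixed label order (alternative decomposition).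

-- ===== PORT A =====
def sentiment_analysis_feedback (updated_data_json : List (List (String × String))) : List String :=
  let init : PySem.Dict String Int := PySem.Dict.mk [("Positivo", 0), ("Neutro", 0), ("Negativo", 0)]
  let sentiment_count := updated_data_json.foldl (fun sc data =>
    match (PySem.Dict.mk data).get? "analyzed" with
    | some a => if sc.contains a then sc.insert a (sc.getD a 0 + 1) else sc
    | none => sc) init
  let max_count := (PySem.List.max? sentiment_count.values (fun v => v)).getD 0
  (sentiment_count.items.filter (fun p => p.2 == max_count)).map (fun p => p.1)

-- ===== PORT B =====
def pvCount (updated_data_json : List (List (String × String))) (s : String) : Int :=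
  updated_data_json.foldl
    (fun acc d => if (PySem.Dict.mk d).get? "analyzed" = some s then acc + 1 else acc) 0

def sentiment_analysis_feedback_alt (updated_data_json : List (List (String × String))) : List String :=
  let labels := ["Positivo", "Neutro", "Negativo"]
  let counts : PySem.Dict String Int :=
    PySem.Dict.ofList (labels.map (fun s => (s, pvCount updated_data_json s)))
  let max_count := (PySem.List.max? counts.values (fun v => v)).getD 0
  labels.filter (fun s => counts.getD s 0 == max_count)

-- ===== PRECONDITION & SPEC =====
def Spec_sentiment_analysis_feedback (updated_data_json : List (List (String × String))) (out : List String) : Prop := out = sentiment_analysis_feedback_alt updated_data_json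
instance (updated_data_json : List (List (String × String))) (out : List String) : Decidable (Spec_sentiment_analysis_feedback updated_data_json out) := by unfold Spec_sentiment_analysis_feedback; infer_instance

-- ===== CLAIM (what is proved, stated in full; the proofs are below) =====
def Claim_equal_sentiment_analysis_feedback : Prop := ∀ (updated_data_json : List (List (String × String))), Dom_sentiment_analysis_feedback updated_data_json → Spec_sentiment_analysis_feedback updated_data_json (sentiment_analysis_feedback updated_data_json)

-- ===== LEMMAS AND PROOFS =====

lemma pvCount_shift (u : List (List (String × String))) (s : String) (a : Int) :
    u.foldl (fun acc d => if (PySem.Dict.mk d).get? "analyzed" = some s then acc + 1 else acc) a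
      = a + pvCount u s := by
  induction u generalizing a with
  | nil => simp [pvCount]
  | cons d t ih =>
      simp only [pvCount, List.foldl_cons] at ih ⊢
      rw [ih]
      conv_rhs => rw [ih]
      split_ifs <;> omega

lemma pvCount_cons (d : List (String × String)) (t : List (List (String × String))) (s : String) :
    pvCount (d :: t) s
      = (if (PySem.Dict.mk d).get? "analyzed" = some s then 1 else 0) + pvCount t s := by
  simp only [pvCount, List.foldl_cons]
  rw [pvCount_shift]
  split_ifs <;> simp [pvCount]

lemma foldA_triple (u : List (List (String × String))) (p n g : Int) :
    u.foldl (fun sc data =>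
        match (PySem.Dict.mk data).get? "analyzed" with
        | some a => if sc.contains a then sc.insert a (sc.getD a 0 + 1) else sc
        | none => sc)
      (PySem.Dict.mk [("Positivo", p), ("Neutro", n), ("Negativo", g)])
      = PySem.Dict.mk [("Positivo", p + pvCount u "Positivo"),
                       ("Neutro", n + pvCount u "Neutro"),
                       ("Negativo", g + pvCount u "Negativo")] := by
  induction u generalizing p n g with
  | nil => simp [pvCount]
  | cons d t ih =>
      rw [List.foldl_cons]
      rcases h : (PySem.Dict.mk d).get? "analyzed" with _ | a
      · simp only []
        rw [ih]
        simp [pvCount_cons, h]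
      · simp only []
        by_cases hp : a = "Positivo"
        · subst hp
          rw [show ((PySem.Dict.mk [("Positivo", p), ("Neutro", n), ("Negativo", g)]).contains "Positivo") = true by simp]
          rw [show ((PySem.Dict.mk [("Positivo", p), ("Neutro", n), ("Negativo", g)]).insert "Positivo"
              ((PySem.Dict.mk [("Positivo", p), ("Neutro", n), ("Negativo", g)]).getD "Positivo" 0 + 1))
              = PySem.Dict.mk [("Positivo", p + 1), ("Neutro", n), ("Negativo", g)] by
            simp [PySem.Dict.insert, PySem.Dict.getD, PySem.Dict.get?]]
          simp only [if_true]
          rw [ih]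
          simp [pvCount_cons, h]
          omega
        · by_cases hn : a = "Neutro"
          · subst hn
            rw [show ((PySem.Dict.mk [("Positivo", p), ("Neutro", n), ("Negativo", g)]).contains "Neutro") = true by simp]
            rw [show ((PySem.Dict.mk [("Positivo", p), ("Neutro", n), ("Negativo", g)]).insert "Neutro"
                ((PySem.Dict.mk [("Positivo", p), ("Neutro", n), ("Negativo", g)]).getD "Neutro" 0 + 1))
                = PySem.Dict.mk [("Positivo", p), ("Neutro", n + 1), ("Negativo", g)] by
              simp [PySem.Dict.insert, PySem.Dict.getD, PySem.Dict.get?]]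
            simp only [if_true]
            rw [ih]
            simp [pvCount_cons, h]
            omega
          · by_cases hg : a = "Negativo"
            · subst hg
              rw [show ((PySem.Dict.mk [("Positivo", p), ("Neutro", n), ("Negativo", g)]).contains "Negativo") = true by simp]
              rw [show ((PySem.Dict.mk [("Positivo", p), ("Neutro", n), ("Negativo", g)]).insert "Negativo"
                  ((PySem.Dict.mk [("Positivo", p), ("Neutro", n), ("Negativo", g)]).getD "Negativo" 0 + 1))
                  = PySem.Dict.mk [("Positivo", p), ("Neutro", n), ("Negativo", g + 1)] by
                simp [PySem.Dict.insert, PySem.Dict.getD, PySem.Dict.get?]]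
              simp only [if_true]
              rw [ih]
              simp [pvCount_cons, h]
              omega
            · rw [show ((PySem.Dict.mk [("Positivo", p), ("Neutro", n), ("Negativo", g)]).contains a) = false by
                simp; exact ⟨Ne.symm hp, Ne.symm hn, Ne.symm hg⟩]
              simp only [Bool.false_eq_true, if_false]
              rw [ih]
              have hc : ∀ s : String, s = "Positivo" ∨ s = "Neutro" ∨ s = "Negativo" →
                  pvCount (d :: t) s = pvCount t s := by
                intro s hs
                rw [pvCount_cons, h]
                have : ¬ (some a = some s) := by
                  rcases hs with rfl | rfl | rfl <;> simp [hp, hn, hg]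
                simp [this]
              rw [hc "Positivo" (Or.inl rfl), hc "Neutro" (Or.inr (Or.inl rfl)),
                  hc "Negativo" (Or.inr (Or.inr rfl))]

lemma ofList_triple (x y z : Int) :
    PySem.Dict.ofList [("Positivo", x), ("Neutro", y), ("Negativo", z)]
      = PySem.Dict.mk [("Positivo", x), ("Neutro", y), ("Negativo", z)] := by
  rfl

-- ===== VERDICT (by name: the statement is the Claim_ definition above) =====
theorem sentiment_analysis_feedback_spec : Claim_equal_sentiment_analysis_feedback := by
  intro u _
  unfold Spec_sentiment_analysis_feedback sentiment_analysis_feedback sentiment_analysis_feedback_alt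
  simp only [List.map_cons, List.map_nil]
  rw [foldA_triple, ofList_triple]
  simp [PySem.Dict.getD, PySem.Dict.get?, List.filter]
  split <;> split <;> split <;> simp
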